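-- pv_equiv track=rewrite | github.com/gahjelle/everybody_codes | python/src/2025_the-song-of-ducks-and-dragons/20_dream-in-triangles/ec202520.py | part1
-- ===== SOURCE A (Python) =====
-- from typing import TypeAlias
--
-- Coordinate: TypeAlias = tuple[int, int]
--
-- Triangles: TypeAlias = set[Coordinate]
--
-- def parse_maze(puzzle_input: str) -> tuple[Triangles, Coordinate, Coordinate, int]:
--     """Parse the triangular maze."""
--     grid = {
--         (row, col): char
--         for row, line in enumerate(puzzle_input.splitlines())
--         for col, char in enumerate(line)
--         if char != "."
--     }
--     triangles = {pos for pos, char in grid.items() if char in "TSE"}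
--     start = next((pos for pos, char in grid.items() if char == "S"), (0, 0))
--     end = next((pos for pos, char in grid.items() if char == "E"), (0, 0))
--     size = max(c for _, c in grid)
--     return triangles, start, end, size
--
-- def part1(puzzle_input: str) -> int:
--     """Solve part 1."""
--     triangles, _, _, _ = parse_maze(puzzle_input)
--     pairs = {
--         (triangle, nbh)
--         for triangle in triangles
--         for nbh in neighbours(triangle)
--         if nbh in triangles
--     }
--     return len(pairs) // 2  # Pairs are double counted
--
-- def neighbours(pos: Coordinate) -> list[Coordinate]:
--     """Find neighbours of a given triangle."""
--     row, col = pos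
--     updown = 1 if (row + col) % 2 else -1
--     return [(row, col - 1), (row, col + 1), (row + updown, col)]
-- ===== SOURCE B (Python) =====
-- def part1(puzzle_input):
--     """Solve part 1: count adjacent triangle pairs by scanning the raw grid lines."""
--     lines = puzzle_input.splitlines()
--     count = 0
--     for line in lines:
--         for a, b in zip(line, line[1:]):
--             if a in "TSE" and b in "TSE":
--                 count += 1
--     for r, (upper, lower) in enumerate(zip(lines, lines[1:])):
--         for c, (a, b) in enumerate(zip(upper, lower)):
--             if (r + c) % 2 == 1 and a in "TSE" and b in "TSE":
--                 count += 1
--     return count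
-- ===== Notes on version B (the rewrite author's own statement) =====
-- stated objective: faster
-- what changed: B never builds a coordinate set or pair set: it scans the raw lines directly, counting horizontal edges by zipping each line with its own tail and vertical edges by zipping consecutive lines (keyed on odd row+col parity), so the grid dict, neighbours()/pair-set/len//2 machinery and all hashing disappear.
-- outside the precondition, e.g. on part1('.'): A raises ValueError, B returns 0
import Mathlib
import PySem

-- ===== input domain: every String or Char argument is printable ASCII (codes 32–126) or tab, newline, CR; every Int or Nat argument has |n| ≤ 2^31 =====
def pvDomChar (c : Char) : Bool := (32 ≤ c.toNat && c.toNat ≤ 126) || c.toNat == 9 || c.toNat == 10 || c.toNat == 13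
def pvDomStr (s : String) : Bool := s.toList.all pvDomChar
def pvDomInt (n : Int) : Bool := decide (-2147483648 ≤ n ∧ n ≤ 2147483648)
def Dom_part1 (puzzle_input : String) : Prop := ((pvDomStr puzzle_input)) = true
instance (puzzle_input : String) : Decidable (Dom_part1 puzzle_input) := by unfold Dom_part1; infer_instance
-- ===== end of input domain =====

-- B scans the raw lines directly (zip each line with its tail for horizontal edges, zip
-- consecutive lines for vertical ones) instead of building A's grid dict / triangle set /
-- double-counted pair set — an alternative with no set machinery at all.

-- ===== PORT A =====
-- neighbours(pos)
def pvNeighbours (pos : Int × Int) : List (Int × Int) :=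
  let row := pos.1
  let col := pos.2
  -- `1 if (row + col) % 2 else -1`
  let updown : Int := if PySem.Int.mod (row + col) 2 ≠ 0 then 1 else -1
  [(row, col - 1), (row, col + 1), (row + updown, col)]

-- parse_maze(puzzle_input); `none` = the ValueError `max()` raises on an empty grid
def pvParseMaze (puzzle_input : String) :
    Option (PySem.Set (Int × Int) × (Int × Int) × (Int × Int) × Int) :=
  let grid : PySem.Dict (Int × Int) Char :=
    (PySem.List.enumerate (PySem.Str.splitlines puzzle_input) 0).foldl
      (fun d rl =>
        (PySem.List.enumerate rl.2.toList 0).foldl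
          (fun d cc => if cc.2 ≠ '.' then d.insert (rl.1, cc.1) cc.2 else d) d)
      PySem.Dict.empty
  -- `char in "TSE"` on a length-1 string is the substring test
  let triangles : PySem.Set (Int × Int) :=
    PySem.Set.ofList
      ((grid.items.filter (fun pc => PySem.Chars.isIn [pc.2] "TSE".toList)).map (·.1))
  let start : Int × Int := (((grid.items.filter (fun pc => pc.2 == 'S')).map (·.1)).head?).getD (0, 0)
  let «end» : Int × Int := (((grid.items.filter (fun pc => pc.2 == 'E')).map (·.1)).head?).getD (0, 0)
  -- `max(c for _, c in grid)` iterates the KEYS (row, col), so c is the column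
  match PySem.List.max? (grid.keys.map (fun k => k.2)) (fun x => x) with
  | none => none
  | some size => some (triangles, start, «end», size)

def part1 (puzzle_input : String) : Int :=
  match pvParseMaze puzzle_input with
  | none => 0   -- unreachable under Pre_part1 (Python raises ValueError)
  | some (triangles, _, _, _) =>
    let pairs : PySem.Set ((Int × Int) × (Int × Int)) :=
      PySem.Set.ofList
        (triangles.flatMap (fun triangle =>
          ((pvNeighbours triangle).filter (fun nbh => PySem.Set.contains triangles nbh)).map
            (fun nbh => (triangle, nbh))))
    PySem.Int.floordiv (PySem.Set.len pairs) 2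

-- ===== PORT B =====
def part1_alt (puzzle_input : String) : Int :=
  let lines := PySem.Str.splitlines puzzle_input
  -- first loop: `for line in lines: for a, b in zip(line, line[1:]): …`
  let count : Int :=
    lines.foldl
      (fun count line =>
        (line.toList.zip (PySem.Str.slice line (some 1) none).toList).foldl
          (fun count ab =>
            if PySem.Chars.isIn [ab.1] "TSE".toList && PySem.Chars.isIn [ab.2] "TSE".toList
            then count + 1 else count)
          count)
      0
  -- second loop: `for r, (upper, lower) in enumerate(zip(lines, lines[1:])): for c, (a, b) in enumerate(zip(upper, lower)): …`
  (PySem.List.enumerate (lines.zip (PySem.List.slice lines (some 1) none)) 0).foldl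
    (fun count rul =>
      (PySem.List.enumerate (rul.2.1.toList.zip rul.2.2.toList) 0).foldl
        (fun count cab =>
          if PySem.Int.mod (rul.1 + cab.1) 2 == 1
             && PySem.Chars.isIn [cab.2.1] "TSE".toList
             && PySem.Chars.isIn [cab.2.2] "TSE".toList
          then count + 1 else count)
        count)
    count

-- ===== PRECONDITION & SPEC =====
-- Pre_ excludes exactly the inputs with no non-'.' character: on those A's `max()` over the empty
-- grid raises ValueError (B returns 0 there).
def Pre_part1 (puzzle_input : String) : Prop :=
  (PySem.Str.splitlines puzzle_input).any (fun line => line.toList.any (fun ch => ch != '.')) = true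
instance (puzzle_input : String) : Decidable (Pre_part1 puzzle_input) := by
  unfold Pre_part1; infer_instance
def pvWitness_part1 : String := "S.T\nTE."

def Spec_part1 (puzzle_input : String) (out : Int) : Prop := out = part1_alt puzzle_input
instance (puzzle_input : String) (out : Int) : Decidable (Spec_part1 puzzle_input out) := by
  unfold Spec_part1; infer_instance

-- ===== CLAIM (what is proved, stated in full; the proofs are below) =====
def Claim_equal_part1 : Prop := ∀ (puzzle_input : String), Dom_part1 puzzle_input →
  Pre_part1 puzzle_input → Spec_part1 puzzle_input (part1 puzzle_input)

-- ===== LEMMAS AND PROOFS =====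

theorem pvMod2 (a : Int) : PySem.Int.mod a 2 = a % 2 :=
  PySem.Int.mod_eq_emod_of_pos (by norm_num)

-- `ch in "TSE"`
def pvP (ch : Char) : Bool := PySem.Chars.isIn [ch] "TSE".toList

-- the grid as a list of char rows
def pvM (s : String) : List (List Char) := (PySem.Str.splitlines s).map String.toList

-- is cell (k, j) a triangle?  (out-of-range reads give '.', which is not a triangle)
def pvTriAt (M : List (List Char)) (k j : Nat) : Bool := pvP ((M.getD k []).getD j '.')

-- one horizontal / vertical edge indicator, keyed on its left / upper cell
def pvCellH (M : List (List Char)) (k j : Nat) : Nat :=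
  if pvTriAt M k j && pvTriAt M k (j + 1) then 1 else 0
def pvCellV (M : List (List Char)) (k j : Nat) : Nat :=
  if ((k + j) % 2 == 1) && pvTriAt M k j && pvTriAt M (k + 1) j then 1 else 0

def pvRow (M : List (List Char)) (f : List (List Char) → Nat → Nat → Nat) (k : Nat) : Nat :=
  ((List.range (M.getD k []).length).map (f M k)).sum
def pvTot (M : List (List Char)) (f : List (List Char) → Nat → Nat → Nat) : Nat :=
  ((List.range M.length).map (pvRow M f)).sum

-- the (position, char) cells of the grid, in scan order
def pvEntries (puzzle_input : String) : List ((Int × Int) × Char) :=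
  (PySem.List.enumerate (PySem.Str.splitlines puzzle_input) 0).flatMap
    (fun rl => (PySem.List.enumerate rl.2.toList 0).map (fun cc => ((rl.1, cc.1), cc.2)))

-- the triangle list A builds
def pvTri (puzzle_input : String) : List (Int × Int) :=
  ((pvEntries puzzle_input).filter (fun e => pvP e.2)).map (·.1)

-- the canonical orientation of an adjacent pair: right neighbour, or below neighbour
def pvCanon (p : (Int × Int) × (Int × Int)) : Bool :=
  (p.2 == (p.1.1, p.1.2 + 1)) || (p.2 == (p.1.1 + 1, p.1.2))

-- A's double-counted pair list before deduplication
def pvPairsList (T : List (Int × Int)) : List ((Int × Int) × (Int × Int)) :=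
  T.flatMap (fun t =>
    ((pvNeighbours t).filter (fun n => PySem.Set.contains T n)).map (fun n => (t, n)))

-- the per-triangle count of canonical pairs
def pvCnt (T : List (Int × Int)) (t : Int × Int) : Nat :=
  (if PySem.Set.contains T (t.1, t.2 + 1) then 1 else 0) +
  (if PySem.Int.mod (t.1 + t.2) 2 == 1 && PySem.Set.contains T (t.1 + 1, t.2) then 1 else 0)

theorem pvEntries_keys_nodup (s : String) : ((pvEntries s).map (·.1)).Nodup := by
  unfold pvEntries
  rw [List.map_flatMap]
  rw [List.nodup_flatMap]
  constructor
  · intro rl _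
    rw [List.map_map]
    have : ((fun x => x.1) ∘ fun cc : Int × Char => ((rl.1, cc.1), cc.2)) =
        (fun c : Int => (rl.1, c)) ∘ (fun cc : Int × Char => cc.1) := rfl
    rw [this, ← List.map_map, PySem.List.map_fst_enumerate]
    exact (PySem.List.nodup_pyRange_one _ _).map (fun a b hab => by simpa using hab)
  · refine (PySem.List.pairwise_lt_enumerate _ _).imp ?_
    intro p q hpq x hx hy
    simp only [List.mem_map] at hx hy
    obtain ⟨a, ⟨a', -, rfl⟩, ha⟩ := hx
    obtain ⟨b, ⟨b', -, rfl⟩, hb⟩ := hy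
    rw [← ha] at hb
    exact absurd (congrArg Prod.fst hb) (by simp; omega)

theorem pvFilter_keys_nodup (s : String) (p : ((Int × Int) × Char) → Bool) :
    (((pvEntries s).filter p).map (·.1)).Nodup :=
  ((pvEntries_keys_nodup s).sublist (List.Sublist.map _ List.filter_sublist))

theorem pvTri_nodup (s : String) : (pvTri s).Nodup := pvFilter_keys_nodup s _

theorem pvGrid_items (s : String) :
    ((PySem.List.enumerate (PySem.Str.splitlines s) 0).foldl
      (fun d rl =>
        (PySem.List.enumerate rl.2.toList 0).foldl
          (fun d cc => if cc.2 ≠ '.' then d.insert (rl.1, cc.1) cc.2 else d) d)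
      PySem.Dict.empty).items = (pvEntries s).filter (fun e => e.2 != '.') := by
  have h1 : ∀ (init : PySem.Dict (Int × Int) Char),
      (PySem.List.enumerate (PySem.Str.splitlines s) 0).foldl
        (fun d rl =>
          (PySem.List.enumerate rl.2.toList 0).foldl
            (fun d cc => if cc.2 ≠ '.' then d.insert (rl.1, cc.1) cc.2 else d) d) init
      = (pvEntries s).foldl
          (fun d e => if (e.2 != '.') = true then d.insert e.1 e.2 else d) init := by
    intro init
    unfold pvEntries
    rw [List.foldl_flatMap]
    simp only [List.foldl_map]
    congr 1
    funext d rl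
    congr 1
    funext d' cc
    by_cases h : cc.2 = '.' <;> simp [h]
  rw [h1, ← List.foldl_filter]
  have h2 := PySem.Dict.items_foldl_insert_fresh
    ((pvEntries s).filter (fun e => e.2 != '.')) (fun e => e.1) (fun e => e.2)
    PySem.Dict.empty (by intro a _; simp [PySem.Dict.contains_empty])
    (pvFilter_keys_nodup s _)
  simpa using h2

theorem pvTriA_eq (s : String) :
    PySem.Set.ofList
      ((((pvEntries s).filter (fun e => e.2 != '.')).filter
        (fun pc => PySem.Chars.isIn [pc.2] "TSE".toList)).map (·.1)) = pvTri s := by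
  rw [List.filter_filter]
  have hp : (fun (a : (Int × Int) × Char) => PySem.Chars.isIn [a.2] "TSE".toList && (a.2 != '.'))
      = (fun a : (Int × Int) × Char => pvP a.2) := by
    funext a
    cases hm : PySem.Chars.isIn [a.2] "TSE".toList with
    | false => unfold pvP; rw [hm]; simp
    | true =>
      have hmem : a.2 ∈ "TSE".toList :=
        ((PySem.Chars.isIn_iff_infix _ _).mp hm).subset (List.mem_singleton_self _)
      have hne : a.2 ≠ '.' := fun hEq => by rw [hEq] at hmem; revert hmem; decide
      unfold pvP; rw [hm]; simp [hne]
  rw [hp]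
  exact PySem.Set.ofList_eq_self_of_nodup _ (pvTri_nodup s)

theorem pvMem_entries (s : String) (k j : Nat)
    (hk : k < (PySem.Str.splitlines s).length)
    (hj : j < ((PySem.Str.splitlines s)[k]).toList.length) :
    (((k : Int), (j : Int)), ((PySem.Str.splitlines s)[k]).toList[j]) ∈ pvEntries s := by
  unfold pvEntries
  rw [List.mem_flatMap]
  refine ⟨((k : Int), (PySem.Str.splitlines s)[k]), ?_, ?_⟩
  · rw [PySem.List.mem_enumerate_iff]
    exact ⟨k, hk, by simp⟩
  · rw [List.mem_map]
    refine ⟨((j : Int), ((PySem.Str.splitlines s)[k]).toList[j]), ?_, rfl⟩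
    rw [PySem.List.mem_enumerate_iff]
    exact ⟨j, hj, by simp⟩

theorem pvMax?_some (l : List Int) (h : l ≠ []) :
    ∃ m, PySem.List.max? l (fun x => x) = some m := by
  cases l with
  | nil => simp at h
  | cons x xs =>
    simp only [PySem.List.max?]
    clear h
    induction xs generalizing x with
    | nil => exact ⟨x, rfl⟩
    | cons y ys ih =>
      simp only [List.foldl_cons]
      by_cases hxy : x < y <;> simp [hxy] <;> exact ih _

theorem pvParse_some (s : String) (h : Pre_part1 s) :
    ∃ st en sz, pvParseMaze s = some (pvTri s, st, en, sz) := by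
  have hne : (pvEntries s).filter (fun e => e.2 != '.') ≠ [] := by
    unfold Pre_part1 at h
    simp only [List.any_eq_true, bne_iff_ne] at h
    obtain ⟨line, hl, ch, hc, hch⟩ := h
    obtain ⟨k, hk, rfl⟩ := List.mem_iff_getElem.mp hl
    obtain ⟨j, hj, rfl⟩ := List.mem_iff_getElem.mp hc
    intro hemp
    have hmem := pvMem_entries s k j hk hj
    have hmem' : (((k : Int), (j : Int)), ((PySem.Str.splitlines s)[k]).toList[j])
        ∈ (pvEntries s).filter (fun e => e.2 != '.') := by
      rw [List.mem_filter]
      exact ⟨hmem, by simpa using hch⟩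
    rw [hemp] at hmem'
    simp at hmem'
  unfold pvParseMaze
  simp only [pvGrid_items, PySem.Dict.keys]
  obtain ⟨m, hm⟩ := pvMax?_some
    ((((pvEntries s).filter (fun e => e.2 != '.')).map (·.1)).map (fun k => k.2))
    (by simpa using hne)
  rw [hm]
  exact ⟨_, _, m, by rw [pvTriA_eq]⟩

theorem pvNeighbours_nodup (t : Int × Int) : (pvNeighbours t).Nodup := by
  obtain ⟨r, c⟩ := t
  simp only [pvNeighbours, pvMod2]
  split_ifs with h <;> simp [Prod.ext_iff] <;> omega

theorem pvNeighbours_symm {n t : Int × Int} (h : n ∈ pvNeighbours t) : t ∈ pvNeighbours n := by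
  obtain ⟨r, c⟩ := t
  obtain ⟨r', c'⟩ := n
  simp only [pvNeighbours, pvMod2, List.mem_cons, Prod.mk.injEq, List.mem_nil_iff, or_false] at h ⊢
  split_ifs at h ⊢ <;> omega

theorem pvCanon_xor {n t : Int × Int} (h : n ∈ pvNeighbours t) :
    pvCanon (t, n) = !pvCanon (n, t) := by
  rw [Bool.eq_not_iff]
  obtain ⟨r, c⟩ := t
  obtain ⟨r', c'⟩ := n
  simp only [pvNeighbours, pvMod2, List.mem_cons, Prod.mk.injEq, List.mem_nil_iff, or_false] at h
  split_ifs at h with hpar <;>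
    rcases h with ⟨h1, h2⟩ | ⟨h1, h2⟩ | ⟨h1, h2⟩ <;> subst h1 <;> subst h2 <;>
    simp [pvCanon, Prod.ext_iff] <;> omega

theorem pvMem_pairs (T : List (Int × Int)) (p : (Int × Int) × (Int × Int)) :
    p ∈ pvPairsList T ↔ p.1 ∈ T ∧ p.2 ∈ pvNeighbours p.1 ∧ p.2 ∈ T := by
  unfold pvPairsList
  simp only [List.mem_flatMap, List.mem_map, List.mem_filter]
  constructor
  · rintro ⟨t, ht, n, ⟨hn, hc⟩, rfl⟩
    exact ⟨ht, hn, by simpa using hc⟩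
  · rintro ⟨h1, h2, h3⟩
    exact ⟨p.1, h1, p.2, ⟨h2, by simpa using h3⟩, rfl⟩

theorem pvPairs_nodup (T : List (Int × Int)) (hT : T.Nodup) : (pvPairsList T).Nodup := by
  unfold pvPairsList
  rw [List.nodup_flatMap]
  constructor
  · intro t _
    exact (((pvNeighbours_nodup t).filter _).map (fun a b hab => by simpa using hab))
  · refine hT.imp ?_
    intro a b hab x hx hy
    simp only [List.mem_map] at hx hy
    obtain ⟨n, -, rfl⟩ := hx
    obtain ⟨m, -, hm⟩ := hy
    exact hab (congrArg Prod.fst hm).symm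

-- the pairing argument: swapping a pair is an involution exchanging canonical and
-- non-canonical pairs, so A's pair list has twice the canonical pairs
theorem pvPairs_len (T : List (Int × Int)) (hT : T.Nodup) :
    (pvPairsList T).length = 2 * ((pvPairsList T).filter pvCanon).length := by
  have hnd := pvPairs_nodup T hT
  have hperm : ((pvPairsList T).filter (fun p => !pvCanon p)).Perm
      (((pvPairsList T).filter pvCanon).map Prod.swap) := by
    rw [List.perm_ext_iff_of_nodup (hnd.filter _)
      ((hnd.filter _).map Prod.swap_injective)]
    intro q
    simp only [List.mem_map, List.mem_filter, Bool.not_eq_eq_eq_not, Bool.not_true]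
    constructor
    · rintro ⟨hq, hcq⟩
      rw [pvMem_pairs] at hq
      have hx : pvCanon q = !pvCanon q.swap := pvCanon_xor hq.2.1
      refine ⟨q.swap, ⟨?_, ?_⟩, Prod.swap_swap q⟩
      · rw [pvMem_pairs]
        exact ⟨hq.2.2, pvNeighbours_symm hq.2.1, hq.1⟩
      · rw [hcq] at hx
        simpa using hx.symm
    · rintro ⟨p, ⟨hp, hcp⟩, rfl⟩
      rw [pvMem_pairs] at hp
      have hx : pvCanon p = !pvCanon p.swap := pvCanon_xor hp.2.1
      rw [hcp] at hx
      constructor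
      · rw [pvMem_pairs]
        exact ⟨hp.2.2, pvNeighbours_symm hp.2.1, hp.1⟩
      · simpa using hx.symm
  have h1 : ((pvPairsList T).filter (fun p => !pvCanon p)).length
      = ((pvPairsList T).filter pvCanon).length := by
    rw [hperm.length_eq, List.length_map]
  have h2 := List.length_eq_length_filter_add (l := pvPairsList T) (f := pvCanon)
  omega

theorem pvCanon_left (r c : Int) : pvCanon ((r, c), (r, c - 1)) = false := by
  simp [pvCanon, Prod.ext_iff]; omega
theorem pvCanon_right (r c : Int) : pvCanon ((r, c), (r, c + 1)) = true := by
  simp [pvCanon]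
theorem pvCanon_down (r c : Int) : pvCanon ((r, c), (r + 1, c)) = true := by
  simp [pvCanon]
theorem pvCanon_up' (r c : Int) : pvCanon ((r, c), (r + -1, c)) = false := by
  simp [pvCanon, Prod.ext_iff]

theorem pvBlock_canon (T : List (Int × Int)) (t : Int × Int) :
    ((((pvNeighbours t).filter (fun n => PySem.Set.contains T n)).map
      (fun n => (t, n))).filter pvCanon).length = pvCnt T t := by
  obtain ⟨r, c⟩ := t
  rw [List.filter_map, List.length_map, List.filter_filter]
  simp only [pvNeighbours, pvMod2, pvCnt, Function.comp]
  by_cases hpar : (r + c) % 2 = 0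
  · have hm : (PySem.Int.mod (r + c) 2 == 1) = false := by
      rw [pvMod2]; simp [hpar]
    simp only [if_neg (by omega : ¬((r + c) % 2 ≠ 0)), hm]
    simp only [List.filter_cons, List.filter_nil, pvCanon_left, pvCanon_right, pvCanon_up',
      Bool.and_false, Bool.and_true, Bool.false_and, Bool.true_and]
    by_cases h1 : ((r, c + 1) : Int × Int) ∈ T <;>
      simp [h1, List.contains_iff_mem, PySem.Set.contains] <;> omega
  · have hm : (PySem.Int.mod (r + c) 2 == 1) = true := by
      rw [pvMod2]; simp only [beq_iff_eq]; omega
    have hA : (r + c) % 2 = 1 := by omega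
    simp only [if_pos (by omega : (r + c) % 2 ≠ 0), hm]
    simp only [List.filter_cons, List.filter_nil, pvCanon_left, pvCanon_right, pvCanon_down,
      Bool.and_false, Bool.and_true, Bool.false_and, Bool.true_and]
    by_cases h1 : ((r, c + 1) : Int × Int) ∈ T <;>
      by_cases h2 : ((r + 1, c) : Int × Int) ∈ T <;>
      simp [h1, h2, hA, List.contains_iff_mem, PySem.Set.contains] <;> omega

theorem pvFilter_canon_len (T : List (Int × Int)) :
    ((pvPairsList T).filter pvCanon).length = (T.map (pvCnt T)).sum := by
  unfold pvPairsList
  rw [List.filter_flatMap, List.length_flatMap]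
  exact congrArg List.sum (List.map_congr_left (fun t _ => pvBlock_canon T t))

-- ---------- generic sum plumbing ----------

theorem pvSum_filter_map {α : Type} (l : List α) (p : α → Bool) (f : α → Nat) :
    (((l.filter p).map f).sum) = (l.map (fun x => if p x then f x else 0)).sum := by
  induction l with
  | nil => rfl
  | cons x t ih =>
    by_cases h : p x <;> simp [h, ih]

theorem pvSum_map_add {α : Type} (l : List α) (f g : α → Nat) :
    (l.map (fun x => f x + g x)).sum = (l.map f).sum + (l.map g).sum := by
  induction l with
  | nil => rfl
  | cons x t ih => simp [ih]; omega

theorem pvSum_map_flatMap {α β : Type} (l : List α) (g : α → List β) (F : β → Nat) :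
    ((l.flatMap g).map F).sum = (l.map (fun x => ((g x).map F).sum)).sum := by
  induction l with
  | nil => rfl
  | cons x t ih => simp [List.flatMap_cons, List.map_append, List.sum_append, ih]

theorem pvSum_map_enumerate {α : Type} (xs : List α) (d : α) (g : Int × α → Nat) :
    ∀ m : Nat, ((PySem.List.enumerate xs ((m : Nat) : Int)).map g).sum
      = ((List.range xs.length).map (fun i => g (((m + i : Nat) : Int), xs.getD i d))).sum := by
  induction xs with
  | nil => intro m; rfl
  | cons x t ih =>
    intro m
    rw [PySem.List.enumerate_cons]
    have h1 : ((m : Int) + 1) = (((m + 1 : Nat)) : Int) := by push_cast; ring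
    rw [List.map_cons, List.sum_cons, h1, ih (m + 1)]
    rw [List.length_cons, List.range_succ_eq_map, List.map_cons, List.map_map, List.sum_cons]
    have htail : List.map
          ((fun i => g (((m + i : Nat) : Int), (x :: t).getD i d)) ∘ Nat.succ)
          (List.range t.length)
        = List.map (fun i => g (((m + 1 + i : Nat) : Int), t.getD i d))
            (List.range t.length) := by
      apply List.map_congr_left
      intro i _
      simp only [Function.comp, Nat.succ_eq_add_one, List.getD_cons_succ]
      have e : m + (i + 1) = m + 1 + i := by omega
      rw [e]
    rw [htail]
    norm_num

theorem pvSum_map_enumerate0 {α : Type} (xs : List α) (d : α) (g : Int × α → Nat) :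
    ((PySem.List.enumerate xs 0).map g).sum
      = ((List.range xs.length).map (fun i => g (((i : Nat) : Int), xs.getD i d))).sum := by
  have h := pvSum_map_enumerate xs d g 0
  simpa using h

theorem pvSum_map_getD {α : Type} (l : List α) (d : α) (f : α → Nat) :
    (l.map f).sum = ((List.range l.length).map (fun k => f (l.getD k d))).sum := by
  induction l with
  | nil => rfl
  | cons x t ih =>
    rw [List.map_cons, List.sum_cons, List.length_cons, List.range_succ_eq_map,
      List.map_cons, List.map_map, List.sum_cons, ih]
    have htail : List.map ((fun k => f ((x :: t).getD k d)) ∘ Nat.succ) (List.range t.length)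
        = List.map (fun k => f (t.getD k d)) (List.range t.length) := by
      apply List.map_congr_left
      intro i _
      simp only [Function.comp, Nat.succ_eq_add_one, List.getD_cons_succ]
    rw [htail]
    norm_num

theorem pvCountP_eq_sum {α : Type} (l : List α) (p : α → Bool) :
    l.countP p = (l.map (fun x => if p x then 1 else 0)).sum := by
  induction l with
  | nil => rfl
  | cons x t ih =>
    rw [List.countP_cons, List.map_cons, List.sum_cons, ih]
    by_cases h : p x <;> simp [h] <;> omega

theorem pvSum_map_cast {α : Type} (l : List α) (f : α → Nat) :
    (l.map (fun x => ((f x : Nat) : Int))).sum = (((l.map f).sum : Nat) : Int) := by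
  induction l with
  | nil => rfl
  | cons x t ih =>
    rw [List.map_cons, List.sum_cons, List.map_cons, List.sum_cons, ih]
    push_cast; ring

theorem pvSum_range_zero_tail (f : Nat → Nat) (m : Nat) :
    ∀ n, m ≤ n → (∀ j, m ≤ j → f j = 0) →
      ((List.range n).map f).sum = ((List.range m).map f).sum := by
  intro n
  induction n with
  | zero => intro h _; interval_cases m; rfl
  | succ n ih =>
    intro hmn hz
    rcases Nat.lt_or_ge m (n + 1) with h | h
    · have hm : m ≤ n := by omega
      rw [List.range_succ, List.map_append, List.sum_append]
      simp [hz n hm, ih hm hz]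
    · have : m = n + 1 := by omega
      subst this; rfl

-- ---------- the triangle-membership characterisation ----------

theorem pvM_getD (s : String) (k : Nat) :
    (pvM s).getD k [] = ((PySem.Str.splitlines s).getD k "").toList := by
  unfold pvM
  rw [List.getD_eq_getElem?_getD, List.getD_eq_getElem?_getD, List.getElem?_map]
  cases h : (PySem.Str.splitlines s)[k]? <;> rfl

theorem pvM_length (s : String) : (pvM s).length = (PySem.Str.splitlines s).length := by
  unfold pvM; rw [List.length_map]

theorem pvP_dot : pvP '.' = false := by decide

theorem pv_mem_tri (s : String) (x : Int × Int) :
    x ∈ pvTri s ↔ ∃ k j : Nat, x = ((k : Int), (j : Int)) ∧ pvTriAt (pvM s) k j = true := by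
  constructor
  · intro hx
    unfold pvTri pvEntries at hx
    simp only [List.mem_map, List.mem_filter, List.mem_flatMap,
      PySem.List.mem_enumerate_iff, zero_add] at hx
    obtain ⟨⟨pos, ch⟩, ⟨⟨rl, ⟨k, hk, rfl⟩, hcc⟩, hp⟩, rfl⟩ := hx
    obtain ⟨cc, ⟨j, hj, rfl⟩, hEq⟩ := hcc
    rw [Prod.mk.injEq] at hEq
    obtain ⟨h1, h2⟩ := hEq
    refine ⟨k, j, by simp [← h1], ?_⟩
    unfold pvTriAt
    rw [pvM_getD]
    have hrow : (PySem.Str.splitlines s).getD k "" = (PySem.Str.splitlines s)[k] :=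
      List.getD_eq_getElem _ _ hk
    rw [hrow, List.getD_eq_getElem _ _ (by simpa using hj)]
    simp only at hp
    rw [← h2] at hp
    exact hp
  · rintro ⟨k, j, rfl, ht⟩
    unfold pvTriAt at ht
    rw [pvM_getD] at ht
    by_cases hk : k < (PySem.Str.splitlines s).length
    · have hrow : (PySem.Str.splitlines s).getD k "" = (PySem.Str.splitlines s)[k] :=
        List.getD_eq_getElem _ _ hk
      rw [hrow] at ht
      by_cases hj : j < ((PySem.Str.splitlines s)[k]).toList.length
      · rw [List.getD_eq_getElem _ _ hj] at ht
        unfold pvTri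
        rw [List.mem_map]
        exact ⟨(((k : Int), (j : Int)), ((PySem.Str.splitlines s)[k]).toList[j]),
          List.mem_filter.mpr ⟨pvMem_entries s k j hk hj, ht⟩, rfl⟩
      · rw [List.getD_eq_default _ _ (by omega)] at ht
        rw [pvP_dot] at ht; exact absurd ht (by simp)
    · have hdef : (PySem.Str.splitlines s).getD k "" = "" :=
        List.getD_eq_default _ _ (by omega)
      rw [hdef] at ht
      have hnil : ("" : String).toList = ([] : List Char) := rfl
      rw [hnil, List.getD_nil, pvP_dot] at ht
      exact absurd ht (by simp)

theorem pv_contains_tri (s : String) (k j : Nat) :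
    PySem.Set.contains (pvTri s) ((k : Int), (j : Int)) = pvTriAt (pvM s) k j := by
  cases ht : pvTriAt (pvM s) k j with
  | true =>
    have : ((k : Int), (j : Int)) ∈ pvTri s := (pv_mem_tri s _).mpr ⟨k, j, rfl, ht⟩
    simpa [PySem.Set.contains, List.contains_iff_mem] using this
  | false =>
    have : ((k : Int), (j : Int)) ∉ pvTri s := by
      intro hmem
      obtain ⟨k', j', hEq, ht'⟩ := (pv_mem_tri s _).mp hmem
      obtain ⟨h1, h2⟩ := Prod.mk.injEq .. ▸ hEq
      have hkk : k = k' := by exact_mod_cast h1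
      have hjj : j = j' := by exact_mod_cast h2
      subst hkk; subst hjj
      rw [ht'] at ht; exact absurd ht (by simp)
    simpa [PySem.Set.contains, List.contains_iff_mem] using this

theorem pvParity (k j : Nat) :
    (PySem.Int.mod ((k : Int) + (j : Int)) 2 == 1) = (((k + j) % 2 : Nat) == 1) := by
  rw [pvMod2]
  rcases Nat.mod_two_eq_zero_or_one (k + j) with h | h
  · rw [h, show ((k : Int) + (j : Int)) % 2 = 0 from by omega]; rfl
  · rw [h, show ((k : Int) + (j : Int)) % 2 = 1 from by omega]; rfl

-- ---------- A's triangle sum equals the cell-indicator double sum ----------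

theorem pvCell_eq (s : String) (k j : Nat) :
    (if pvP (((pvM s).getD k []).getD j '.') then pvCnt (pvTri s) ((k : Int), (j : Int)) else 0)
      = pvCellH (pvM s) k j + pvCellV (pvM s) k j := by
  have hx : pvTriAt (pvM s) k j = pvP (((pvM s).getD k []).getD j '.') := rfl
  unfold pvCnt pvCellH pvCellV
  have e1 : ((j : Int) + 1) = ((j + 1 : Nat) : Int) := by push_cast; ring
  have e2 : ((k : Int) + 1) = ((k + 1 : Nat) : Int) := by push_cast; ring
  simp only [e1, e2, pv_contains_tri, pvParity]
  rw [← hx]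
  cases h0 : pvTriAt (pvM s) k j <;>
    cases h1 : pvTriAt (pvM s) k (j + 1) <;>
    cases h2 : pvTriAt (pvM s) (k + 1) j <;>
    cases h3 : (((k + j) % 2 : Nat) == 1) <;> simp

theorem pvA_sum (s : String) :
    ((pvTri s).map (pvCnt (pvTri s))).sum = pvTot (pvM s) pvCellH + pvTot (pvM s) pvCellV := by
  have hstep : ∀ (c : Int × Int → Nat),
      ((pvTri s).map c).sum
        = ((List.range (PySem.Str.splitlines s).length).map
            (fun k => (((PySem.List.enumerate ((PySem.Str.splitlines s).getD k "").toList 0).map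
              (fun cc : Int × Char =>
                if pvP cc.2 then c ((k : Int), cc.1) else 0)).sum))).sum := by
    intro c
    unfold pvTri pvEntries
    rw [List.map_map, pvSum_filter_map, pvSum_map_flatMap, pvSum_map_enumerate0 _ ""]
    apply congrArg List.sum
    apply List.map_congr_left
    intro k _
    rw [List.map_map]
    rfl
  have hpoint : ∀ k ∈ List.range (PySem.Str.splitlines s).length,
      (((PySem.List.enumerate ((PySem.Str.splitlines s).getD k "").toList 0).map
        (fun cc : Int × Char =>
          if pvP cc.2 then pvCnt (pvTri s) ((k : Int), cc.1) else 0)).sum)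
        = pvRow (pvM s) pvCellH k + pvRow (pvM s) pvCellV k := by
    intro k _
    rw [pvSum_map_enumerate0 _ '.']
    unfold pvRow
    rw [← pvSum_map_add]
    rw [show ((PySem.Str.splitlines s).getD k "").toList = (pvM s).getD k []
        from (pvM_getD s k).symm]
    apply congrArg List.sum
    apply List.map_congr_left
    intro j _
    exact pvCell_eq s k j
  rw [hstep (pvCnt (pvTri s)), List.map_congr_left hpoint, pvSum_map_add]
  unfold pvTot
  rw [pvM_length]

-- ---------- B's scan equals the same double sum ----------

theorem pvRowH (l : List Char) :
    (l.zip l.tail).countP (fun ab => pvP ab.1 && pvP ab.2)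
      = ((List.range l.length).map
          (fun j => if pvP (l.getD j '.') && pvP (l.getD (j + 1) '.') then 1 else 0)).sum := by
  induction l with
  | nil => rfl
  | cons a t ih =>
    have hhead : (if pvP a && pvP (t.getD 0 '.') then 1 else 0)
        + ((List.range t.length).map
            (fun j => if pvP (t.getD j '.') && pvP (t.getD (j + 1) '.') then 1 else 0)).sum
        = ((List.range (a :: t).length).map
            (fun j => if pvP ((a :: t).getD j '.') && pvP ((a :: t).getD (j + 1) '.')
              then 1 else 0)).sum := by
      rw [List.length_cons, List.range_succ_eq_map, List.map_cons, List.map_map, List.sum_cons]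
      have htail : List.map
            ((fun j => if pvP ((a :: t).getD j '.') && pvP ((a :: t).getD (j + 1) '.')
              then 1 else 0) ∘ Nat.succ) (List.range t.length)
          = List.map (fun j => if pvP (t.getD j '.') && pvP (t.getD (j + 1) '.')
              then 1 else 0) (List.range t.length) := by
        apply List.map_congr_left
        intro j _
        simp only [Function.comp, Nat.succ_eq_add_one, List.getD_cons_succ]
      rw [htail]
      simp
    rw [← hhead]
    cases t with
    | nil => simp [pvP_dot]
    | cons b t' =>
      have hz : ((a :: b :: t').zip (a :: b :: t').tail)
          = (a, b) :: ((b :: t').zip (b :: t').tail) := rfl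
      rw [hz, List.countP_cons, ih]
      simp only [List.getD_cons_zero]
      omega

theorem pvRow_cellH (s : String) (k : Nat) :
    pvRow (pvM s) pvCellH k
      = ((((PySem.Str.splitlines s).getD k "").toList.zip
          ((PySem.Str.splitlines s).getD k "").toList.tail).countP
            (fun ab => pvP ab.1 && pvP ab.2)) := by
  rw [pvRowH]
  unfold pvRow pvCellH pvTriAt
  rw [pvM_getD]

theorem pvRow_cellV_zero (s : String) (k : Nat)
    (hk : (PySem.Str.splitlines s).length ≤ k + 1) : pvRow (pvM s) pvCellV k = 0 := by
  unfold pvRow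
  have hz : ∀ j, 0 ≤ j → pvCellV (pvM s) k j = 0 := by
    intro j _
    unfold pvCellV pvTriAt
    have : (pvM s).getD (k + 1) [] = [] :=
      List.getD_eq_default _ _ (by rw [pvM_length]; omega)
    rw [this, List.getD_nil, pvP_dot]
    simp
  have h := pvSum_range_zero_tail (pvCellV (pvM s) k) 0 ((pvM s).getD k []).length
    (Nat.zero_le _) hz
  simpa using h

theorem pvRow_cellV (s : String) (k : Nat) (hk : k + 1 < (PySem.Str.splitlines s).length) :
    pvRow (pvM s) pvCellV k
      = ((PySem.List.enumerate
            (((PySem.Str.splitlines s)[k]'(by omega)).toList.zip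
              ((PySem.Str.splitlines s)[k + 1]'hk).toList) 0).countP
          (fun cab => PySem.Int.mod ((k : Int) + cab.1) 2 == 1
            && pvP cab.2.1 && pvP cab.2.2)) := by
  have hku : k < (PySem.Str.splitlines s).length := by omega
  set u := ((PySem.Str.splitlines s)[k]'hku).toList with hu
  set w := ((PySem.Str.splitlines s)[k + 1]'hk).toList with hw
  rw [pvCountP_eq_sum, pvSum_map_enumerate0 _ ('.', '.')]
  rw [List.length_zip]
  unfold pvRow
  have hrowk : (pvM s).getD k [] = u := by
    rw [pvM_getD, List.getD_eq_getElem _ _ hku]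
  have hrowk1 : (pvM s).getD (k + 1) [] = w := by
    rw [pvM_getD, List.getD_eq_getElem _ _ hk]
  rw [hrowk]
  have hmin : min u.length w.length ≤ u.length := Nat.min_le_left _ _
  rw [pvSum_range_zero_tail (pvCellV (pvM s) k) (min u.length w.length) u.length hmin ?hz]
  case hz =>
    intro j hj
    unfold pvCellV pvTriAt
    rcases Nat.lt_or_ge j u.length with hju | hju
    · have hjw : w.length ≤ j := by omega
      rw [hrowk1, List.getD_eq_default _ _ hjw, pvP_dot]
      simp
    · rw [hrowk, List.getD_eq_default _ _ hju, pvP_dot]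
      simp
  apply congrArg List.sum
  apply List.map_congr_left
  intro j hj
  rw [List.mem_range] at hj
  have hju : j < u.length := by omega
  have hjw : j < w.length := by omega
  rw [List.getD_eq_getElem _ _ (by rw [List.length_zip]; omega), List.getElem_zip]
  unfold pvCellV pvTriAt
  rw [hrowk, hrowk1, List.getD_eq_getElem _ _ hju, List.getD_eq_getElem _ _ hjw, pvParity]

theorem pvB_eq (s : String) :
    part1_alt s = ((pvTot (pvM s) pvCellH + pvTot (pvM s) pvCellV : Nat) : Int) := by
  unfold part1_alt
  simp only []
  -- the horizontal loop: zip(line, line[1:]) pairs up each char with its right neighbour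
  have hf1 : (fun (count : Int) (line : String) =>
      (line.toList.zip (PySem.Str.slice line (some 1) none).toList).foldl
        (fun count ab =>
          if PySem.Chars.isIn [ab.1] "TSE".toList && PySem.Chars.isIn [ab.2] "TSE".toList
          then count + 1 else count) count)
      = (fun (count : Int) (line : String) => count
          + (((line.toList.zip line.toList.tail).countP
              (fun ab => pvP ab.1 && pvP ab.2) : Nat) : Int)) := by
    funext count line
    rw [show (PySem.Str.slice line (some 1) none).toList = line.toList.tail from by
      rw [PySem.Str.toList_slice]; exact PySem.List.slice_from_one line.toList]
    exact PySem.List.foldl_if_add_one _ _ _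
  rw [hf1, PySem.List.foldl_add]
  -- the vertical loop: zip(lines, lines[1:]) pairs up each line with the one below it
  have hf2 : (fun (count : Int) (rul : Int × (String × String)) =>
      (PySem.List.enumerate (rul.2.1.toList.zip rul.2.2.toList) 0).foldl
        (fun count cab =>
          if PySem.Int.mod (rul.1 + cab.1) 2 == 1
             && PySem.Chars.isIn [cab.2.1] "TSE".toList
             && PySem.Chars.isIn [cab.2.2] "TSE".toList
          then count + 1 else count) count)
      = (fun (count : Int) (rul : Int × (String × String)) => count
          + (((PySem.List.enumerate (rul.2.1.toList.zip rul.2.2.toList) 0).countP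
              (fun cab => PySem.Int.mod (rul.1 + cab.1) 2 == 1
                && pvP cab.2.1 && pvP cab.2.2) : Nat) : Int)) := by
    funext count rul
    exact PySem.List.foldl_if_add_one _ _ _
  rw [hf2, PySem.List.foldl_add, PySem.List.slice_from_one]
  -- horizontal part
  have hH : ((PySem.Str.splitlines s).map (fun line =>
        (((line.toList.zip line.toList.tail).countP
          (fun ab => pvP ab.1 && pvP ab.2) : Nat) : Int))).sum
      = ((pvTot (pvM s) pvCellH : Nat) : Int) := by
    rw [pvSum_map_cast]
    congr 1
    rw [pvSum_map_getD _ ""]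
    unfold pvTot
    rw [pvM_length]
    apply congrArg List.sum
    apply List.map_congr_left
    intro k _
    exact (pvRow_cellH s k).symm
  -- vertical part
  have hV : ((PySem.List.enumerate
        ((PySem.Str.splitlines s).zip (PySem.Str.splitlines s).tail) 0).map
        (fun rul : Int × (String × String) =>
          (((PySem.List.enumerate (rul.2.1.toList.zip rul.2.2.toList) 0).countP
            (fun cab => PySem.Int.mod (rul.1 + cab.1) 2 == 1
              && pvP cab.2.1 && pvP cab.2.2) : Nat) : Int))).sum
      = ((pvTot (pvM s) pvCellV : Nat) : Int) := by
    rw [pvSum_map_cast]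
    congr 1
    rw [pvSum_map_enumerate0 _ ("", "")]
    set n := (PySem.Str.splitlines s).length with hn
    have hlen : ((PySem.Str.splitlines s).zip (PySem.Str.splitlines s).tail).length
        = n - 1 := by
      rw [List.length_zip, List.length_tail]
      omega
    rw [hlen]
    unfold pvTot
    rw [pvM_length, ← hn]
    rw [pvSum_range_zero_tail (pvRow (pvM s) pvCellV) (n - 1) n (by omega) ?hz0]
    case hz0 =>
      intro k hk
      exact pvRow_cellV_zero s k (by omega)
    apply congrArg List.sum
    apply List.map_congr_left
    intro k hk
    rw [List.mem_range] at hk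
    have hk1 : k + 1 < n := by omega
    have hpair : ((PySem.Str.splitlines s).zip (PySem.Str.splitlines s).tail).getD k ("", "")
        = ((PySem.Str.splitlines s)[k]'(by omega), (PySem.Str.splitlines s)[k + 1]'hk1) := by
      rw [List.getD_eq_getElem _ _ (by rw [List.length_zip, List.length_tail]; omega),
        List.getElem_zip]
      congr 1
      rw [List.getElem_tail]
    rw [hpair]
    exact (pvRow_cellV s k hk1).symm
  rw [hH, hV]
  push_cast
  ring

-- ===== VERDICT (by name: the statement is the Claim_ definition above) =====
theorem part1_spec : Claim_equal_part1 := by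
  intro s _ hpre
  unfold Spec_part1
  obtain ⟨st, en, sz, hparse⟩ := pvParse_some s hpre
  unfold part1
  simp only [hparse]
  have hT := pvTri_nodup s
  have hP : PySem.Set.ofList (pvPairsList (pvTri s)) = pvPairsList (pvTri s) :=
    PySem.Set.ofList_eq_self_of_nodup _ (pvPairs_nodup _ hT)
  unfold pvPairsList at hP
  rw [hP]
  have hlen := pvPairs_len (pvTri s) hT
  rw [pvFilter_canon_len, pvA_sum] at hlen
  rw [pvB_eq]
  show PySem.Int.floordiv (PySem.Set.len _) 2 = _
  rw [PySem.Set.len]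
  unfold pvPairsList at hlen
  rw [hlen]
  rw [PySem.Int.floordiv_eq_ediv_of_pos (by norm_num)]
  push_cast
  omega
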